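-- pv_equiv track=rewrite | github.com/KorvpalliRobot/OOP_korvpallirobot | system/camera.py | median_from_unsorted_array
-- ===== SOURCE A (Python) =====
-- def median_from_unsorted_array(array):
--     median_pos = len(array) // 2
--
--     while len(array) > 1:
--         pivot = array[len(array) // 2]
--
--         left = []
--         equal = []
--         right = []
--         for element in array:
--             if element > pivot:
--                 right.append(element)
--             elif element < pivot:
--                 left.append(element)
--             else:
--                 equal.append(element)
--
--         if len(left) - 1 < median_pos < len(left) + len(equal):
--             return equal[0]
--         else:
--             if len(left) > len(right) + len(equal):
--                 array = left
--                 median_pos = median_pos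
--             elif len(right) > len(left) + len(equal):
--                 array = right
--                 median_pos = median_pos - (len(left) + len(equal))
--             else:
--                 return equal[0]
--     if len(array) == 0:
--         return -1
--     return array[0]
-- ===== SOURCE B (Python) =====
-- def _qsel(a, k):
--     if not a:
--         return -1
--     if len(a) == 1:
--         return a[0]
--     pivot = a[len(a) // 2]
--     left = [x for x in a if x < pivot]
--     right = [x for x in a if x > pivot]
--     nl, nr = len(left), len(right)
--     ne = len(a) - nl - nr
--     if nl <= k < nl + ne:
--         return pivot
--     if nl > nr + ne:
--         return _qsel(left, k)
--     if nr > nl + ne: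
--         return _qsel(right, k - (nl + ne))
--     return pivot
--
--
-- def median_from_unsorted_array(array):
--     return _qsel(array, len(array) // 2)
-- ===== Notes on version B (the rewrite author's own statement) =====
-- stated objective: alternative
-- what changed: Replaced the in-place while-loop that rebuilds three appended partition lists (left/equal/right) with state mutation by a recursive quickselect helper that builds only the left/right partitions via comprehensions, derives the equal-count arithmetically, and returns the pivot directly instead of indexing the head of the equal list.
import Mathlib
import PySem

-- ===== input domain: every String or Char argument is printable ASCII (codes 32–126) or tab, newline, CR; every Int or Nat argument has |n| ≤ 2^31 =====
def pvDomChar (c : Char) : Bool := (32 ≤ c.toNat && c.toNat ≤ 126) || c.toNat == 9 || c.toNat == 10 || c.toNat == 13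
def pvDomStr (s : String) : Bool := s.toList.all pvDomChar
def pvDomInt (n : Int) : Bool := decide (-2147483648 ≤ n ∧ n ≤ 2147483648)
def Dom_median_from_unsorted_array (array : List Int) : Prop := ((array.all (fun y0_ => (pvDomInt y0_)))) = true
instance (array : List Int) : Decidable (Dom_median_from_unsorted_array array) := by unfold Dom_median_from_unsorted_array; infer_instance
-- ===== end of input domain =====

-- B re-implements the iterative quickselect loop as a recursion with filter-built partitions and
-- no `equal` list (objective: alternative decomposition; same asymptotic cost).

-- ===== PORT A =====
-- the for-loop that partitions `array` around `pivot` into (left, equal, right), appending in order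
def pvPartStep (pivot : Int) (acc : List Int × List Int × List Int) (e : Int) :
    List Int × List Int × List Int :=
  if e > pivot then (acc.1, acc.2.1, acc.2.2 ++ [e])
  else if e < pivot then (acc.1 ++ [e], acc.2.1, acc.2.2)
  else (acc.1, acc.2.1 ++ [e], acc.2.2)

def pvPart (pivot : Int) (array : List Int) : List Int × List Int × List Int :=
  array.foldl (pvPartStep pivot) ([], [], [])

theorem pvPart_gen (pivot : Int) (l : List Int) :
    ∀ a b c, l.foldl (pvPartStep pivot) (a, b, c) =
      (a ++ l.filter (fun x => x < pivot), b ++ l.filter (fun x => x = pivot),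
        c ++ l.filter (fun x => pivot < x)) := by
  induction l with
  | nil => simp
  | cons x t ih =>
    intro a b c
    simp only [List.foldl_cons, List.filter_cons, pvPartStep]
    rcases lt_trichotomy x pivot with h | h | h
    · have h1 : ¬ x > pivot := by omega
      have h2 : ¬ pivot < x := by omega
      have h3 : ¬ x = pivot := by omega
      simp [h, h1, h2, h3, ih]
    · simp [h, lt_irrefl, ih]
    · have h2 : ¬ x < pivot := by omega
      have h3 : ¬ x = pivot := by omega
      simp [h, h2, h3, ih]

theorem pvPart_eq (pivot : Int) (l : List Int) :
    pvPart pivot l = (l.filter (fun x => x < pivot), l.filter (fun x => x = pivot),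
      l.filter (fun x => pivot < x)) := by
  simpa using pvPart_gen pivot l [] [] []

theorem pvFilter_len_sum (pivot : Int) (l : List Int) :
    (l.filter (fun x => x < pivot)).length + (l.filter (fun x => x = pivot)).length
      + (l.filter (fun x => pivot < x)).length = l.length := by
  induction l with
  | nil => simp
  | cons x t ih =>
    simp only [List.filter_cons]
    rcases lt_trichotomy x pivot with h | h | h
    · have h2 : ¬ pivot < x := by omega
      have h3 : ¬ x = pivot := by omega
      simp [h, h2, h3]; omega
    · simp [h, lt_irrefl]; omega
    · have h2 : ¬ x < pivot := by omega
      have h3 : ¬ x = pivot := by omega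
      simp [h, h2, h3]; omega

theorem pvEqual_ne_nil (pivot : Int) (l : List Int) (h : pivot ∈ l) :
    l.filter (fun x => x = pivot) ≠ [] := by
  simp only [ne_eq, List.filter_eq_nil_iff]
  push_neg
  exact ⟨pivot, h, by simp⟩

theorem pvPivot_mem (l : List Int) (h : 0 < l.length) : l.getD (l.length / 2) 0 ∈ l := by
  have hlt : l.length / 2 < l.length := Nat.div_lt_self h (by omega)
  rw [List.getD_eq_getElem l 0 hlt]
  exact List.getElem_mem hlt

theorem pvEqual_len_pos (l : List Int) (h : 1 < l.length) :
    0 < (l.filter (fun x => x = l.getD (l.length / 2) 0)).length := by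
  have := pvEqual_ne_nil (l.getD (l.length / 2) 0) l (pvPivot_mem l (by omega))
  cases hf : l.filter (fun x => x = l.getD (l.length / 2) 0) with
  | nil => exact absurd hf this
  | cons a t => simp

theorem pvLeft_len_lt (l : List Int) (h : 1 < l.length) :
    (l.filter (fun x => x < l.getD (l.length / 2) 0)).length < l.length := by
  have hs := pvFilter_len_sum (l.getD (l.length / 2) 0) l
  have he := pvEqual_len_pos l h
  omega

theorem pvRight_len_lt (l : List Int) (h : 1 < l.length) :
    (l.filter (fun x => l.getD (l.length / 2) 0 < x)).length < l.length := by
  have hs := pvFilter_len_sum (l.getD (l.length / 2) 0) l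
  have he := pvEqual_len_pos l h
  omega

-- the `while len(array) > 1` loop with state (array, median_pos); the trailing
-- `if len(array)==0: return -1 / return array[0]` is the else-branch.
-- every Python indexing here (the pivot index, the head of `equal`, the head of `array`) is in
-- range wherever evaluated, so getD is exact.
def pvALoop (array : List Int) (median_pos : Int) : Int :=
  if h : array.length > 1 then
    let pivot := array.getD (array.length / 2) 0
    let p := pvPart pivot array
    if ((p.1.length : Int) - 1 < median_pos ∧ median_pos < (p.1.length : Int) + p.2.1.length) then
      p.2.1.getD 0 0
    else if p.1.length > p.2.2.length + p.2.1.length then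
      pvALoop p.1 median_pos
    else if p.2.2.length > p.1.length + p.2.1.length then
      pvALoop p.2.2 (median_pos - ((p.1.length : Int) + p.2.1.length))
    else
      p.2.1.getD 0 0
  else if array.length = 0 then -1
  else array.getD 0 0
termination_by array.length
decreasing_by
  · simpa [pvPart_eq] using pvLeft_len_lt array h
  · simpa [pvPart_eq] using pvRight_len_lt array h

def median_from_unsorted_array (array : List Int) : Int :=
  pvALoop array ((array.length : Int) / 2)

-- ===== PORT B =====
def pvQsel (a : List Int) (k : Int) : Int :=
  if a = [] then -1
  else if h1 : a.length = 1 then a.getD 0 0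
  else if h : 1 < a.length then
    let pivot := a.getD (a.length / 2) 0
    let left := a.filter (fun x => x < pivot)
    let right := a.filter (fun x => pivot < x)
    let nl := left.length
    let nr := right.length
    let ne := a.length - nl - nr
    if (nl : Int) ≤ k ∧ k < (nl : Int) + (ne : Int) then pivot
    else if nl > nr + ne then pvQsel left k
    else if nr > nl + ne then pvQsel right (k - ((nl : Int) + (ne : Int)))
    else pivot
  else -1  -- unreachable: a ≠ [] and a.length ≠ 1 force 1 < a.length
termination_by a.length
decreasing_by
  · rw [List.length_unattach, ← List.countP_eq_length_filter,
      List.countP_attach (p := fun y => decide (y < a.getD (a.length / 2) 0)),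
      List.countP_eq_length_filter]
    exact pvLeft_len_lt a h
  · rw [List.length_unattach, ← List.countP_eq_length_filter,
      List.countP_attach (p := fun y => decide (a.getD (a.length / 2) 0 < y)),
      List.countP_eq_length_filter]
    exact pvRight_len_lt a h

def median_from_unsorted_array_alt (array : List Int) : Int :=
  pvQsel array ((array.length : Int) / 2)

-- ===== PRECONDITION & SPEC =====
def Spec_median_from_unsorted_array (array : List Int) (out : Int) : Prop := out = median_from_unsorted_array_alt array
instance (array : List Int) (out : Int) : Decidable (Spec_median_from_unsorted_array array out) := by unfold Spec_median_from_unsorted_array; infer_instance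

-- ===== CLAIM (what is proved, stated in full; the proofs are below) =====
def Claim_equal_median_from_unsorted_array : Prop := ∀ (array : List Int), Dom_median_from_unsorted_array array → Spec_median_from_unsorted_array array (median_from_unsorted_array array)

-- ===== LEMMAS AND PROOFS =====
theorem pvEqual_head (pivot : Int) (l : List Int) (h : pivot ∈ l) :
    (l.filter (fun x => x = pivot)).getD 0 0 = pivot := by
  cases hf : l.filter (fun x => x = pivot) with
  | nil => exact absurd hf (pvEqual_ne_nil pivot l h)
  | cons a t =>
    have ha : a ∈ l.filter (fun x => x = pivot) := by rw [hf]; exact List.mem_cons_self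
    have := List.of_mem_filter ha
    simpa using this.symm

theorem pvLoop_eq (a : List Int) (k : Int) : pvALoop a k = pvQsel a k := by
  induction hn : a.length using Nat.strong_induction_on generalizing a k with
  | _ n ih =>
  subst hn
  by_cases h : 1 < a.length
  · have hne : a ≠ [] := by intro hnil; simp [hnil] at h
    have h1 : ¬ a.length = 1 := by omega
    rw [pvALoop, pvQsel]
    simp only [dif_pos h, if_neg hne, dif_neg h1, dif_pos h, pvPart_eq]
    set pivot := a.getD (a.length / 2) 0 with hp
    have hmem : pivot ∈ a := pvPivot_mem a (by omega)
    have hsum := pvFilter_len_sum pivot a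
    have hhead := pvEqual_head pivot a hmem
    set L := a.filter (fun x => x < pivot)
    set E := a.filter (fun x => x = pivot)
    set R := a.filter (fun x => pivot < x)
    have hEne : 0 < E.length := pvEqual_len_pos a h
    have hne_eq : a.length - L.length - R.length = E.length := by omega
    rw [hne_eq]
    have hc : ((L.length : Int) - 1 < k ∧ k < (L.length : Int) + E.length) ↔
        ((L.length : Int) ≤ k ∧ k < (L.length : Int) + (E.length : Int)) := by
      constructor <;> intro ⟨x, y⟩ <;> exact ⟨by omega, by omega⟩
    by_cases hcond : ((L.length : Int) ≤ k ∧ k < (L.length : Int) + (E.length : Int))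
    · rw [if_pos (hc.mpr hcond), if_pos hcond, hhead]
    · rw [if_neg (fun hx => hcond (hc.mp hx)), if_neg hcond]
      by_cases h2 : L.length > R.length + E.length
      · rw [if_pos h2, if_pos h2]
        exact ih L.length (by omega) L k rfl
      · rw [if_neg h2, if_neg h2]
        by_cases h3 : R.length > L.length + E.length
        · rw [if_pos h3, if_pos h3]
          exact ih R.length (by omega) R _ rfl
        · rw [if_neg h3, if_neg h3, hhead]
  · rw [pvALoop, pvQsel]
    simp only [dif_neg h]
    by_cases h0 : a.length = 0
    · have : a = [] := List.length_eq_zero_iff.mp h0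
      simp [this]
    · have h1 : a.length = 1 := by omega
      have hne : a ≠ [] := by intro hnil; simp [hnil] at h1
      simp [hne, h1, h0]

-- ===== VERDICT (by name: the statement is the Claim_ definition above) =====
theorem median_from_unsorted_array_spec : Claim_equal_median_from_unsorted_array := by
  intro array _
  unfold Spec_median_from_unsorted_array median_from_unsorted_array median_from_unsorted_array_alt
  exact pvLoop_eq array _
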